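-- pv_equiv track=rewrite | github.com/miliar/Code_Jam_Webscraper | solutions_python/Problem_201/678.py | bathroomFast
-- ===== SOURCE A (Python) =====
-- def bathroomFast(n, k):
-- 	if n == k:
-- 		return 0, 0
-- 	elif k == 1:
-- 		if isOdd(n):
-- 			return ((n-1)//2, (n-1)//2)
-- 		else:
-- 			return ((n//2), (n//2) - 1)
-- 	else:
-- 		if isOdd(n) and isOdd(k):
-- 			return bathroomFast((n-1)//2, k//2)
-- 		elif isOdd(n) and not isOdd(k):
-- 			return bathroomFast((n-1)//2, ((k-1)//2) + 1)
-- 		elif not isOdd(n) and isOdd(k):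
-- 			return bathroomFast(n//2 - 1, k//2)
-- 		else:
-- 			return bathroomFast(n//2, (k//2))
--
-- def isOdd(n):
-- 	return n % 2 == 1
-- ===== SOURCE B (Python) =====
-- def bathroomFast(n, k):
--     if k < 1:
--         # k never reaches 1, so the only exit is the gap n-k shrinking to 0
--         return (0, 0)
--     t = k.bit_length() - 1        # number of halvings until k becomes 1
--     p = 2 ** t
--     m = n - k
--     if 0 <= m < p:                # n meets k before k reaches 1
--         return (0, 0)
--     g = m // p + 1                # segment size when k hits 1
--     if g % 2:
--         return ((g - 1) // 2, (g - 1) // 2)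
--     return (g // 2, g // 2 - 1)
-- ===== Notes on version B (the rewrite author's own statement) =====
-- stated objective: faster
-- what changed: Replaces the tail recursion by a closed form: each step maps (n-k, k) to (floor((n-k)/2), floor(k/2)), so B computes the step count t = k.bit_length()-1 directly and reads the answer off (n-k) // 2**t, with no loop or recursion.
import Mathlib
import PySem

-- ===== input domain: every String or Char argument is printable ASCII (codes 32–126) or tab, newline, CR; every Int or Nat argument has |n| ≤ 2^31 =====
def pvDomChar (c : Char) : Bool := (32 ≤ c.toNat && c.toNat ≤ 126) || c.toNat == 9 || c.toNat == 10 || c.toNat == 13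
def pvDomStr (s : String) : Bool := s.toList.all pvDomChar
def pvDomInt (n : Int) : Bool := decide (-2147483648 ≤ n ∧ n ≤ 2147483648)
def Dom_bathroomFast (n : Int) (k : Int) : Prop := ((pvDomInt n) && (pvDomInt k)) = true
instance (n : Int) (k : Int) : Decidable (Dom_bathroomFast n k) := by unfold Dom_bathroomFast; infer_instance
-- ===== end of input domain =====

-- B replaces A's tail recursion by a closed form (the step halves both n-k and k, so the
-- answer is read off from (n-k) // 2^(k.bit_length()-1) directly); objective: faster (constant, no recursion).

-- ===== PORT A =====
-- A's recursion does not terminate when n < k ∧ k ≤ 0 (Python: RecursionError), so the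
-- port carries a fuel parameter; Pre_ excludes exactly the diverging inputs, and the
-- chosen fuel is proved sufficient on Pre_ (lemma bathroomFastFuel_eq_alt below).
def pyIsOdd (n : Int) : Bool := PySem.Int.mod n 2 == 1

def bathroomFastFuel : Nat → Int → Int → Int × Int
  | 0, _, _ => (0, 0)
  | f + 1, n, k =>
    if n = k then (0, 0)
    else if k = 1 then
      if pyIsOdd n then (PySem.Int.floordiv (n - 1) 2, PySem.Int.floordiv (n - 1) 2)
      else (PySem.Int.floordiv n 2, PySem.Int.floordiv n 2 - 1)
    else
      if pyIsOdd n && pyIsOdd k then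
        bathroomFastFuel f (PySem.Int.floordiv (n - 1) 2) (PySem.Int.floordiv k 2)
      else if pyIsOdd n && !(pyIsOdd k) then
        bathroomFastFuel f (PySem.Int.floordiv (n - 1) 2) (PySem.Int.floordiv (k - 1) 2 + 1)
      else if !(pyIsOdd n) && pyIsOdd k then
        bathroomFastFuel f (PySem.Int.floordiv n 2 - 1) (PySem.Int.floordiv k 2)
      else
        bathroomFastFuel f (PySem.Int.floordiv n 2) (PySem.Int.floordiv k 2)

def bathroomFast (n : Int) (k : Int) : Int × Int :=
  bathroomFastFuel ((n - k).toNat + k.toNat + 1) n k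

-- ===== PORT B =====
def bathroomFast_alt (n : Int) (k : Int) : Int × Int :=
  if k < 1 then (0, 0)
  else
    let t := PySem.Int.bitLength k - 1
    let p : Int := 2 ^ t
    let m := n - k
    if 0 ≤ m ∧ m < p then (0, 0)
    else
      let g := PySem.Int.floordiv m p + 1
      if PySem.Int.mod g 2 ≠ 0 then
        (PySem.Int.floordiv (g - 1) 2, PySem.Int.floordiv (g - 1) 2)
      else
        (PySem.Int.floordiv g 2, PySem.Int.floordiv g 2 - 1)

-- ===== PRECONDITION & SPEC =====
-- Pre_ excludes exactly the inputs (n < k ∧ k ≤ 0) on which Python A recurses forever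
-- (RecursionError); A returns normally on every other integer input.
def Pre_bathroomFast (n : Int) (k : Int) : Prop := 1 ≤ k ∨ k ≤ n
instance (n : Int) (k : Int) : Decidable (Pre_bathroomFast n k) := by
  unfold Pre_bathroomFast; infer_instance

def pvWitness_bathroomFast : Int × Int := (5, 2)

def Spec_bathroomFast (n : Int) (k : Int) (out : Int × Int) : Prop := out = bathroomFast_alt n k
instance (n : Int) (k : Int) (out : Int × Int) : Decidable (Spec_bathroomFast n k out) := by
  unfold Spec_bathroomFast; infer_instance

-- ===== CLAIM (what is proved, stated in full; the proofs are below) =====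
def Claim_equal_bathroomFast : Prop := ∀ (n : Int) (k : Int), Dom_bathroomFast n k → Pre_bathroomFast n k → Spec_bathroomFast n k (bathroomFast n k)

-- ===== LEMMAS AND PROOFS =====

lemma alt_of_eq (n : Int) : bathroomFast_alt n n = (0, 0) := by
  unfold bathroomFast_alt
  by_cases h : n < 1
  · simp [h]
  · have hp : (0:Int) < 2 ^ (PySem.Int.bitLength n - 1) := by positivity
    simp only [h, if_false, sub_self]
    rw [if_pos ⟨le_refl 0, hp⟩]

lemma bitLength_pos_of_pos {k : Int} (hk : 1 ≤ k) : 1 ≤ PySem.Int.bitLength k := by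
  by_contra h
  have h2 := PySem.Int.lt_two_pow_bitLength k
  have : PySem.Int.bitLength k = 0 := by omega
  rw [this] at h2
  omega

lemma alt_step (n k : Int) (hk : k ≠ 1) :
    bathroomFast_alt ((n - k % 2) / 2) (k / 2) = bathroomFast_alt n k := by
  by_cases hk2 : 2 ≤ k
  · have hk' : ¬ (k / 2 < 1) := by omega
    have hkk : ¬ (k < 1) := by omega
    have hbl : PySem.Int.bitLength k = PySem.Int.bitLength (k / 2) + 1 := by
      have h := PySem.Int.bitLength_of_pos (show (0:Int) < k by omega)
      rwa [PySem.Int.floordiv_eq_ediv_of_pos (show (0:Int) < 2 by omega)] at h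
    have hbl1 : 1 ≤ PySem.Int.bitLength (k / 2) := bitLength_pos_of_pos (by omega)
    unfold bathroomFast_alt
    rw [if_neg hk', if_neg hkk, hbl]
    have hT : PySem.Int.bitLength (k / 2) + 1 - 1 = (PySem.Int.bitLength (k / 2) - 1) + 1 := by omega
    rw [hT]
    set T := PySem.Int.bitLength (k / 2) - 1 with hTdef
    have hm : (n - k % 2) / 2 - k / 2 = (n - k) / 2 := by omega
    rw [hm]
    have hpow : (2:Int) ^ (T + 1) = 2 * 2 ^ T := by ring
    have hTp : (0:Int) < 2 ^ T := by positivity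
    have hcond : (0 ≤ (n - k) / 2 ∧ (n - k) / 2 < 2 ^ T) ↔ (0 ≤ n - k ∧ n - k < 2 ^ (T + 1)) := by
      rw [hpow]; omega
    have hg : PySem.Int.floordiv ((n - k) / 2) (2 ^ T) = PySem.Int.floordiv (n - k) (2 ^ (T + 1)) := by
      rw [PySem.Int.floordiv_eq_ediv_of_pos hTp,
          PySem.Int.floordiv_eq_ediv_of_pos (show (0:Int) < 2 ^ (T+1) by positivity), hpow,
          Int.ediv_ediv_of_nonneg (by omega)]
    by_cases hc : 0 ≤ n - k ∧ n - k < 2 ^ (T + 1)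
    · rw [if_pos (hcond.mpr hc), if_pos hc]
    · rw [if_neg (fun h => hc (hcond.mp h)), if_neg hc, hg]
  · have h0 : k < 1 := by omega
    have h0' : k / 2 < 1 := by omega
    unfold bathroomFast_alt
    rw [if_pos h0', if_pos h0]

lemma pyIsOdd_true {n : Int} (h : n % 2 = 1) : pyIsOdd n = true := by
  unfold pyIsOdd
  rw [PySem.Int.mod_eq_emod_of_pos (by omega), h]
  rfl

lemma pyIsOdd_false {n : Int} (h : n % 2 = 0) : pyIsOdd n = false := by
  unfold pyIsOdd
  rw [PySem.Int.mod_eq_emod_of_pos (by omega), h]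
  rfl

lemma fd2 (a : Int) : PySem.Int.floordiv a 2 = a / 2 :=
  PySem.Int.floordiv_eq_ediv_of_pos (by omega)

lemma bathroomFastFuel_eq_alt : ∀ (f : Nat) (n k : Int), Pre_bathroomFast n k →
    (n - k).toNat + k.toNat < f → bathroomFastFuel f n k = bathroomFast_alt n k := by
  intro f
  induction f with
  | zero => intro n k _ h; omega
  | succ f ih =>
    intro n k hpre hfuel
    unfold Pre_bathroomFast at hpre
    simp only [bathroomFastFuel]
    by_cases hnk : n = k
    · rw [if_pos hnk, hnk, alt_of_eq]
    · rw [if_neg hnk]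
      by_cases hk1 : k = 1
      · subst hk1
        rw [if_pos rfl]
        have hb1 : PySem.Int.bitLength (1:Int) = 1 := by decide
        have hmod : PySem.Int.mod n 2 = n % 2 := PySem.Int.mod_eq_emod_of_pos (by omega)
        simp only [bathroomFast_alt, hb1, Nat.sub_self, pow_zero]
        rw [if_neg (show ¬ ((1:Int) < 1) by omega),
            if_neg (show ¬ (0 ≤ n - 1 ∧ n - 1 < (1:Int)) by omega),
            show PySem.Int.floordiv (n - 1) 1 + 1 = n by
              rw [PySem.Int.floordiv_eq_ediv_of_pos (by omega)]; omega]
        rcases Int.emod_two_eq n with hn | hn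
        · rw [pyIsOdd_false hn]
          simp only [Bool.false_eq_true, reduceIte, hmod, hn, ne_eq, not_true_eq_false]
        · rw [pyIsOdd_true hn]
          simp only [reduceIte, hmod, hn, ne_eq, one_ne_zero, not_false_eq_true]
      · rw [if_neg hk1]
        rcases Int.emod_two_eq n with hn | hn <;> rcases Int.emod_two_eq k with hk | hk
        · -- n even, k even
          rw [pyIsOdd_false hn, pyIsOdd_false hk]
          simp only [Bool.false_and, Bool.not_false, Bool.true_and, Bool.false_eq_true,
            reduceIte]
          rw [show PySem.Int.floordiv n 2 = (n - k % 2) / 2 by rw [fd2]; omega, fd2 k,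
            ih _ _ (by unfold Pre_bathroomFast; omega) (by omega), alt_step n k hk1]
        · -- n even, k odd
          rw [pyIsOdd_false hn, pyIsOdd_true hk]
          simp only [Bool.false_and, Bool.not_false, Bool.true_and, Bool.false_eq_true,
            reduceIte]
          rw [show PySem.Int.floordiv n 2 - 1 = (n - k % 2) / 2 by rw [fd2]; omega, fd2 k,
            ih _ _ (by unfold Pre_bathroomFast; omega) (by omega), alt_step n k hk1]
        · -- n odd, k even
          rw [pyIsOdd_true hn, pyIsOdd_false hk]
          simp only [Bool.true_and, Bool.not_false, Bool.false_eq_true, reduceIte]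
          rw [show PySem.Int.floordiv (n - 1) 2 = (n - k % 2) / 2 by rw [fd2]; omega,
            show PySem.Int.floordiv (k - 1) 2 + 1 = k / 2 by rw [fd2]; omega,
            ih _ _ (by unfold Pre_bathroomFast; omega) (by omega), alt_step n k hk1]
        · -- n odd, k odd
          rw [pyIsOdd_true hn, pyIsOdd_true hk]
          simp only [Bool.true_and, reduceIte]
          rw [show PySem.Int.floordiv (n - 1) 2 = (n - k % 2) / 2 by rw [fd2]; omega, fd2 k,
            ih _ _ (by unfold Pre_bathroomFast; omega) (by omega), alt_step n k hk1]

theorem bathroomFast_spec : Claim_equal_bathroomFast := by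
  intro n k _ hpre
  unfold Spec_bathroomFast bathroomFast
  exact bathroomFastFuel_eq_alt _ n k hpre (by omega)
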